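-- pv_equiv track=rewrite | github.com/theleeguy64-maker/Bridge-Hand-Generator | bridge_engine/deal_output.py | _format_vertical_hand
-- ===== SOURCE A (Python) =====
-- from typing import Dict, List, Sequence
--
-- SUIT_ORDER = "SHDC"
--
-- SUIT_SYMBOLS = {"S": "♠", "H": "♥", "D": "♦", "C": "♣"}
--
-- RANK_ORDER = "AKQJT98765432"
--
-- def _group_cards_by_suit(cards: Sequence[str]) -> Dict[str, List[str]]:
--     """
--     Group cards into suits and sort ranks within each suit.
--
--     cards: list like ["AS", "KH", ...].
--     Returns dict suit -> list of ranks (as single characters).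
--     """
--     result: Dict[str, List[str]] = {s: [] for s in SUIT_ORDER}
--
--     for card in cards:
--         if len(card) != 2:
--             continue
--         rank, suit = card[0], card[1]
--         if suit not in result:
--             continue
--         result[suit].append(rank)
--
--     rank_index = {r: i for i, r in enumerate(RANK_ORDER)}
--     for suit in SUIT_ORDER:
--         result[suit].sort(key=lambda r: rank_index.get(r, 99))
--
--     return result
--
-- def _format_rank_list(ranks: Sequence[str]) -> str:
--     if not ranks:
--         return "-"
--     return " ".join(ranks)
--
-- def _format_vertical_hand(cards: Sequence[str], indent: int = 8) -> List[str]: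
--     """
--     Format a single hand as four vertically stacked suit lines:
--
--         ♠ A K Q
--         ♥ -
--         ♦ T 9
--         ♣ J
--
--     Returns the lines WITHOUT final newline characters.
--     """
--     suits = _group_cards_by_suit(cards)
--     lines: List[str] = []
--     prefix = " " * indent
--     for suit in SUIT_ORDER:
--         symbol = SUIT_SYMBOLS[suit]
--         ranks = _format_rank_list(suits[suit])
--         lines.append(f"{prefix}{symbol} {ranks}")
--     return lines
-- ===== SOURCE B (Python) =====
-- SUIT_ORDER = "SHDC"
-- SUIT_SYMBOLS = {"S": "\u2660", "H": "\u2665", "D": "\u2666", "C": "\u2663"}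
-- RANK_ORDER = "AKQJT98765432"
--
-- def _format_vertical_hand(cards, indent=8):
--     prefix = " " * indent
--     rank_index = {r: i for i, r in enumerate(RANK_ORDER)}
--     lines = []
--     for suit in SUIT_ORDER:
--         ranks = [c[0] for c in cards if len(c) == 2 and c[1] == suit]
--         ranks.sort(key=lambda r: rank_index.get(r, 99))
--         lines.append(f"{prefix}{SUIT_SYMBOLS[suit]} {' '.join(ranks) if ranks else '-'}")
--     return lines
-- ===== Notes on version B (the rewrite author's own statement) =====
-- stated objective: idiomatic
-- what changed: Replaces A's helper pipeline (single-pass grouping dict mutated in place, then four in-dict sorts and a separate rank-list formatter) with one inlined loop that, per suit, filters the ranks from the cards directly, sorts them and formats the line.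
import Mathlib
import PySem

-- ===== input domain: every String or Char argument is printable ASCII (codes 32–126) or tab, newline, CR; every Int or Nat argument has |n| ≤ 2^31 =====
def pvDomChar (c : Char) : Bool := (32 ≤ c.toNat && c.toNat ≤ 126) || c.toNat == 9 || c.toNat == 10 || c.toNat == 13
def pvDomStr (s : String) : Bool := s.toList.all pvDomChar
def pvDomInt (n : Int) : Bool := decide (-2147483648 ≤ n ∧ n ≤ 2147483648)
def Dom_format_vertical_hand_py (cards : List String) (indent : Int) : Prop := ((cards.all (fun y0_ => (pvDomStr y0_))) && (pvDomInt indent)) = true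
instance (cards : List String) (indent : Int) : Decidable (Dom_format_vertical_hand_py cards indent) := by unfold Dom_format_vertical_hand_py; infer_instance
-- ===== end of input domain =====

-- B inlines the helpers and, per suit, filters + sorts the ranks directly (idiomatic), instead of A's
-- grouping dict built in one pass and mutated in place; return values proved equal on all inputs.

-- shared module constants (SUIT_ORDER, SUIT_SYMBOLS, RANK_ORDER and the rank_index comprehension
-- both Pythons build identically)
def pvSuitOrder : List Char := ['S', 'H', 'D', 'C']
def pvSuitSymbols : PySem.Dict Char Char := ⟨[('S', '♠'), ('H', '♥'), ('D', '♦'), ('C', '♣')]⟩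
def pvRankOrder : List Char := ['A','K','Q','J','T','9','8','7','6','5','4','3','2']
-- {r: i for i, r in enumerate(RANK_ORDER)}
def pvRankIndex : PySem.Dict Char Int :=
  (PySem.List.enumerate pvRankOrder).foldl (fun d p => d.insert p.2 p.1) PySem.Dict.empty

-- ===== PORT A =====
-- loop body of _group_cards_by_suit: skip len(card) != 2, skip suit not in result, else append rank
def pvGroupStep (d : PySem.Dict Char (List Char)) (card : String) : PySem.Dict Char (List Char) :=
  match card.toList with
  | [rank, suit] => if d.contains suit then d.modify suit [] (· ++ [rank]) else d
  | _ => d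

-- _group_cards_by_suit
def pvGroupCards (cards : List String) : PySem.Dict Char (List Char) :=
  let init : PySem.Dict Char (List Char) := ⟨[('S', []), ('H', []), ('D', []), ('C', [])]⟩
  let grouped := cards.foldl pvGroupStep init
  pvSuitOrder.foldl
    (fun d s => d.modify s [] (fun l => PySem.List.sorted l (fun r => pvRankIndex.getD r 99) false)) grouped

-- _format_rank_list ("-" if empty, else " ".join; ranks are single chars, so join = intersperse, exact)
def pvFmtRanks (ranks : List Char) : List Char :=
  if ranks = [] then ['-'] else List.intersperse ' ' ranks

def format_vertical_hand_py (cards : List String) (indent : Int) : List String :=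
  let suits := pvGroupCards cards
  let pre := List.replicate indent.toNat ' '   -- " " * indent ("" when indent ≤ 0)
  pvSuitOrder.map (fun suit =>
    String.ofList (pre ++ ((pvSuitSymbols.get? suit).getD ' ') :: ' ' :: pvFmtRanks (suits.getD suit [])))

-- ===== PORT B =====
def format_vertical_hand_py_alt (cards : List String) (indent : Int) : List String :=
  let pre := List.replicate indent.toNat ' '
  pvSuitOrder.map (fun suit =>
    let ranks := cards.filterMap (fun c =>
      match c.toList with
      | [r, s] => if s = suit then some r else none
      | _ => none)
    let sorted := PySem.List.sorted ranks (fun r => pvRankIndex.getD r 99) false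
    String.ofList (pre ++ ((pvSuitSymbols.get? suit).getD ' ') :: ' ' ::
      (if sorted = [] then ['-'] else List.intersperse ' ' sorted)))

-- ===== PRECONDITION & SPEC =====
def Spec_format_vertical_hand_py (cards : List String) (indent : Int) (out : List String) : Prop := out = format_vertical_hand_py_alt cards indent
instance (cards : List String) (indent : Int) (out : List String) : Decidable (Spec_format_vertical_hand_py cards indent out) := by unfold Spec_format_vertical_hand_py; infer_instance

-- ===== CLAIM (what is proved, stated in full; the proofs are below) =====
def Claim_equal_format_vertical_hand_py : Prop := ∀ (cards : List String) (indent : Int), Dom_format_vertical_hand_py cards indent → Spec_format_vertical_hand_py cards indent (format_vertical_hand_py cards indent)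

-- ===== LEMMAS AND PROOFS =====
-- B's per-suit selection
def pvSel (suit : Char) (cards : List String) : List Char :=
  cards.filterMap (fun c =>
    match c.toList with
    | [r, s] => if s = suit then some r else none
    | _ => none)

-- A's grouping loop, run from any 4-entry accumulator, yields exactly B's per-suit selections.
theorem pvGroup_loop (cards : List String) (aS aH aD aC : List Char) :
    cards.foldl pvGroupStep ⟨[('S', aS), ('H', aH), ('D', aD), ('C', aC)]⟩ =
      ⟨[('S', aS ++ pvSel 'S' cards), ('H', aH ++ pvSel 'H' cards),
       ('D', aD ++ pvSel 'D' cards), ('C', aC ++ pvSel 'C' cards)]⟩ := by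
  induction cards generalizing aS aH aD aC with
  | nil => simp [pvSel]
  | cons c cs ih =>
    simp only [List.foldl_cons]
    rcases h : c.toList with _ | ⟨r, _ | ⟨s, _ | ⟨x, xs⟩⟩⟩ <;>
      simp only [pvGroupStep, h]
    · rw [ih]; simp [pvSel, h]
    · rw [ih]; simp [pvSel, h]
    · by_cases hS : s = 'S'
      · subst hS
        simp [PySem.Dict.contains, PySem.Dict.modify, PySem.Dict.insert, PySem.Dict.getD,
          PySem.Dict.get?, ih, pvSel, h]
      · by_cases hH : s = 'H'
        · subst hH
          simp [PySem.Dict.contains, PySem.Dict.modify, PySem.Dict.insert, PySem.Dict.getD,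
            PySem.Dict.get?, ih, pvSel, h]
        · by_cases hD : s = 'D'
          · subst hD
            simp [PySem.Dict.contains, PySem.Dict.modify, PySem.Dict.insert, PySem.Dict.getD,
              PySem.Dict.get?, ih, pvSel, h]
          · by_cases hC : s = 'C'
            · subst hC
              simp [PySem.Dict.contains, PySem.Dict.modify, PySem.Dict.insert, PySem.Dict.getD,
                PySem.Dict.get?, ih, pvSel, h]
            · have hcon : (⟨[('S', aS), ('H', aH), ('D', aD), ('C', aC)]⟩ :
                  PySem.Dict Char (List Char)).contains s = false := by
                have hS' : ¬('S' = s) := fun e => hS e.symm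
                have hH' : ¬('H' = s) := fun e => hH e.symm
                have hD' : ¬('D' = s) := fun e => hD e.symm
                have hC' : ¬('C' = s) := fun e => hC e.symm
                simp [PySem.Dict.contains, hS', hH', hD', hC']
              rw [if_neg (by rw [hcon]; exact Bool.false_ne_true), ih]
              simp [pvSel, h, hS, hH, hD, hC]
    · rw [ih]; simp [pvSel, h]

-- ===== VERDICT (by name: the statement is the Claim_ definition above) =====
theorem format_vertical_hand_py_spec : Claim_equal_format_vertical_hand_py := by
  intro cards indent _
  show format_vertical_hand_py cards indent = format_vertical_hand_py_alt cards indent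
  simp only [format_vertical_hand_py, format_vertical_hand_py_alt, pvGroupCards]
  rw [pvGroup_loop cards [] [] [] []]
  simp [pvSuitOrder, PySem.Dict.modify, PySem.Dict.insert, PySem.Dict.getD, PySem.Dict.get?,
    PySem.Dict.contains, pvFmtRanks, pvSel]
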